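-- pv_equiv track=rewrite | github.com/qjqmftptkdit/Nt | icmpScan.py | getIpList
-- ===== SOURCE A (Python) =====
-- def getIpList(ipRange) :
--     ip, ntBits = ipRange.split('/')
--     ipList = []
--
--     if ntBits=="24" :
--         for i in range(256) :
--             ipList.append(".".join(ip.split('.')[:-1]) + "." + str(i))
--     elif ntBits=="16" :
--         for i in range(256) :
--             for j in range(256) :
--                 ipList.append(".".join(ip.split('.')[:-2]) + "." + str(i) + "." + str(j))
--     elif ntBits=="8" :
--         for i in range(256) :
--             for j in range(256) :
--                 for z in range(256) :
--                     ipList.append(".".join(ip.split('.')[:-3]) + "." + str(i) + "." + str(j) + "." + str(z))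
--
--     return ipList
-- ===== SOURCE B (Python) =====
-- def getIpList(ipRange):
--     ip, ntBits = ipRange.split('/')
--     n = {"24": 1, "16": 2, "8": 3}.get(ntBits)
--     if n is None:
--         return []
--     out = [".".join(ip.split('.')[:-n])]
--     for _ in range(n):
--         out = [s + "." + str(i) for s in out for i in range(256)]
--     return out
-- ===== Notes on version B (the rewrite author's own statement) =====
-- stated objective: simpler
-- what changed: Replaces the three separate nested-loop branches by one parametrized pass: a dict maps ntBits to the number n of varying octets, the prefix is computed once, and a single repeated list-comprehension expansion (n rounds of appending '.'+str(i) for i in range(256)) builds the list.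
import Mathlib
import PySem

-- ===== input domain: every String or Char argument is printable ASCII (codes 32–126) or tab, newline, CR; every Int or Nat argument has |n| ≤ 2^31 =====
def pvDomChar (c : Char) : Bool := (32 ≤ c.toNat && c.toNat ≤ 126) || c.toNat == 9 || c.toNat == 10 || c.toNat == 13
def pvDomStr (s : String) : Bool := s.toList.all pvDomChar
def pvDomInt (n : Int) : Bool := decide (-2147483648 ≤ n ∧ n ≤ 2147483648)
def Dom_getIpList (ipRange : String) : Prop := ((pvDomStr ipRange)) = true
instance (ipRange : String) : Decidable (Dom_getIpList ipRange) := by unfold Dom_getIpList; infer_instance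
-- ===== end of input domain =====

-- B replaces A's three hard-coded nested-loop branches by one parametrized expansion pass
-- (dict ntBits -> octet count n, prefix computed once, n rounds of one comprehension): simpler.

-- ===== PORT A =====
def getIpList (ipRange : String) : List String :=
  match PySem.Str.split? ipRange "/" with
  | some [ip, ntBits] =>
    if ntBits == "24" then
      (PySem.List.pyRange 0 256 1).foldl (fun acc i =>
        acc ++ [PySem.Str.join "." (PySem.List.slice ((PySem.Str.split? ip ".").getD []) none (some (-1)))
                ++ "." ++ PySem.Int.toStr i]) []
    else if ntBits == "16" then
      (PySem.List.pyRange 0 256 1).foldl (fun acc i =>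
        (PySem.List.pyRange 0 256 1).foldl (fun acc2 j =>
          acc2 ++ [PySem.Str.join "." (PySem.List.slice ((PySem.Str.split? ip ".").getD []) none (some (-2)))
                   ++ "." ++ PySem.Int.toStr i ++ "." ++ PySem.Int.toStr j]) acc) []
    else if ntBits == "8" then
      (PySem.List.pyRange 0 256 1).foldl (fun acc i =>
        (PySem.List.pyRange 0 256 1).foldl (fun acc2 j =>
          (PySem.List.pyRange 0 256 1).foldl (fun acc3 z =>
            acc3 ++ [PySem.Str.join "." (PySem.List.slice ((PySem.Str.split? ip ".").getD []) none (some (-3)))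
                     ++ "." ++ PySem.Int.toStr i ++ "." ++ PySem.Int.toStr j ++ "." ++ PySem.Int.toStr z]) acc2) acc) []
    else []
  | _ => []  -- Python raises ValueError here (unpacking); excluded by Pre_

-- ===== PORT B =====
-- one round of Source B's comprehension: [s + "." + str(i) for s in out for i in range(256)]
def pvExpand (out : List String) : List String :=
  out.flatMap (fun s => (PySem.List.pyRange 0 256 1).map (fun i => s ++ "." ++ PySem.Int.toStr i))

def getIpList_alt (ipRange : String) : List String :=
  let parts := (PySem.Str.split? ipRange "/").getD []
  if parts.length = 2 then  -- 'ip, ntBits = ipRange.split('/')': Python raises ValueError otherwise (excluded by Pre_)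
    let ip := parts.getD 0 ""
    let ntBits := parts.getD 1 ""
    match (PySem.Dict.ofList [("24", (1 : Int)), ("16", 2), ("8", 3)]).get? ntBits with
    | none => []
    | some n =>
      (PySem.List.pyRange 0 n 1).foldl (fun out _ => pvExpand out)
        [PySem.Str.join "." (PySem.List.slice ((PySem.Str.split? ip ".").getD []) none (some (-n)))]
  else []

-- ===== PRECONDITION & SPEC =====
-- Pre_ excludes exactly the inputs where A raises ValueError: ipRange.split('/') must unpack into two parts,
-- i.e. ipRange contains exactly one '/'.
def Pre_getIpList (ipRange : String) : Prop := ((PySem.Str.split? ipRange "/").getD []).length = 2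
instance (ipRange : String) : Decidable (Pre_getIpList ipRange) := by unfold Pre_getIpList; infer_instance
def pvWitness_getIpList : String := "192.168.1.7/24"

def Spec_getIpList (ipRange : String) (out : List String) : Prop := out = getIpList_alt ipRange
instance (ipRange : String) (out : List String) : Decidable (Spec_getIpList ipRange out) := by unfold Spec_getIpList; infer_instance

-- ===== CLAIM (what is proved, stated in full; the proofs are below) =====
def Claim_equal_getIpList : Prop := ∀ (ipRange : String), Dom_getIpList ipRange → Pre_getIpList ipRange → Spec_getIpList ipRange (getIpList ipRange)

-- ===== LEMMAS AND PROOFS =====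

theorem pvR1 : PySem.List.pyRange 0 1 1 = [0] := by
  rw [PySem.List.pyRange_one_cons (by norm_num : (0:Int) < 1)]
  norm_num [PySem.List.pyRange_one_eq_nil]

theorem pvR2 : PySem.List.pyRange 0 2 1 = [0, 1] := by
  rw [PySem.List.pyRange_one_cons (by norm_num : (0:Int) < 2),
      PySem.List.pyRange_one_cons (by norm_num : (0+1:Int) < 2)]
  norm_num [PySem.List.pyRange_one_eq_nil]

theorem pvR3 : PySem.List.pyRange 0 3 1 = [0, 1, 2] := by
  rw [PySem.List.pyRange_one_cons (by norm_num : (0:Int) < 3),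
      PySem.List.pyRange_one_cons (by norm_num : (0+1:Int) < 3),
      PySem.List.pyRange_one_cons (by norm_num : (0+1+1:Int) < 3)]
  norm_num [PySem.List.pyRange_one_eq_nil]

theorem pv_case24 (p : String) :
    (PySem.List.pyRange 0 256 1).foldl (fun acc i => acc ++ [p ++ "." ++ PySem.Int.toStr i]) []
      = (PySem.List.pyRange 0 1 1).foldl (fun out _ => pvExpand out) [p] := by
  rw [pvR1]
  show _ = pvExpand [p]
  unfold pvExpand
  generalize PySem.List.pyRange 0 256 1 = R
  rw [PySem.List.foldl_append_singleton_eq_map,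
      List.nil_append, List.flatMap_cons, List.flatMap_nil, List.append_nil]

theorem pv_case16 (p : String) :
    (PySem.List.pyRange 0 256 1).foldl (fun acc i =>
      (PySem.List.pyRange 0 256 1).foldl (fun acc2 j =>
        acc2 ++ [p ++ "." ++ PySem.Int.toStr i ++ "." ++ PySem.Int.toStr j]) acc) []
      = (PySem.List.pyRange 0 2 1).foldl (fun out _ => pvExpand out) [p] := by
  rw [pvR2]
  show _ = pvExpand (pvExpand [p])
  unfold pvExpand
  generalize PySem.List.pyRange 0 256 1 = R
  simp only [PySem.List.foldl_append_singleton_eq_map]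
  rw [PySem.List.foldl_append_eq_flatMap,
      List.nil_append, List.flatMap_cons, List.flatMap_nil, List.append_nil, List.flatMap_map]

theorem pv_case8 (p : String) :
    (PySem.List.pyRange 0 256 1).foldl (fun acc i =>
      (PySem.List.pyRange 0 256 1).foldl (fun acc2 j =>
        (PySem.List.pyRange 0 256 1).foldl (fun acc3 z =>
          acc3 ++ [p ++ "." ++ PySem.Int.toStr i ++ "." ++ PySem.Int.toStr j ++ "." ++ PySem.Int.toStr z]) acc2) acc) []
      = (PySem.List.pyRange 0 3 1).foldl (fun out _ => pvExpand out) [p] := by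
  rw [pvR3]
  show _ = pvExpand (pvExpand (pvExpand [p]))
  unfold pvExpand
  generalize PySem.List.pyRange 0 256 1 = R
  simp only [PySem.List.foldl_append_singleton_eq_map]
  simp only [PySem.List.foldl_append_eq_flatMap]
  rw [List.nil_append, List.flatMap_cons, List.flatMap_nil, List.append_nil, List.flatMap_map,
      List.flatMap_assoc]
  congr 1
  funext i
  rw [List.flatMap_map]

theorem pv_if_pos {X Y : List String} {b c : String} (h : (b == c) = true) :
    (if b == c then X else Y) = X := by rw [h]; rfl

theorem pv_if_neg {X Y : List String} {b c : String} (h : (b == c) = false) :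
    (if b == c then X else Y) = Y := by rw [h]; rfl

theorem pv_dict_none (x : String) (h1 : x ≠ "24") (h2 : x ≠ "16") (h3 : x ≠ "8") :
    (PySem.Dict.ofList [("24", (1 : Int)), ("16", 2), ("8", 3)]).get? x = none := by
  simp [PySem.Dict.ofList, PySem.Dict.update, PySem.Dict.get?, PySem.Dict.insert, PySem.Dict.empty,
        PySem.Dict.contains]
  exact ⟨fun h => h1 h.symm, fun h => h2 h.symm, fun h => h3 h.symm⟩

theorem pv_main (s : String) : getIpList s = getIpList_alt s := by
  unfold getIpList getIpList_alt
  cases h : PySem.Str.split? s "/" with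
  | none => rfl
  | some l =>
    cases l with
    | nil => rfl
    | cons a t =>
      cases t with
      | nil => rfl
      | cons b t2 =>
        cases t2 with
        | cons c t3 =>
          dsimp only
          rw [if_neg (by simp)]
        | nil =>
          dsimp only
          rw [if_pos (show ((some [a, b]).getD ([] : List String)).length = 2 by simp)]
          simp only [Option.getD_some, List.getD_cons_zero, List.getD_cons_succ]
          by_cases h24 : b = "24"
          · subst h24
            rw [pv_if_pos (by decide),
                show (PySem.Dict.ofList [("24", (1 : Int)), ("16", 2), ("8", 3)]).get? "24" = some 1 from rfl]
            exact pv_case24 _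
          · by_cases h16 : b = "16"
            · subst h16
              rw [pv_if_neg (by decide), pv_if_pos (by decide),
                  show (PySem.Dict.ofList [("24", (1 : Int)), ("16", 2), ("8", 3)]).get? "16" = some 2 from rfl]
              exact pv_case16 _
            · by_cases h8 : b = "8"
              · subst h8
                rw [pv_if_neg (by decide), pv_if_neg (by decide), pv_if_pos (by decide),
                    show (PySem.Dict.ofList [("24", (1 : Int)), ("16", 2), ("8", 3)]).get? "8" = some 3 from rfl]
                exact pv_case8 _
              · rw [pv_if_neg (beq_eq_false_iff_ne.mpr h24), pv_if_neg (beq_eq_false_iff_ne.mpr h16),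
                    pv_if_neg (beq_eq_false_iff_ne.mpr h8), pv_dict_none b h24 h16 h8]

-- ===== VERDICT (by name: the statement is the Claim_ definition above) =====
theorem getIpList_spec : Claim_equal_getIpList := by
  intro s _ _
  exact pv_main s
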